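-- pv_equiv track=rewrite | github.com/amonty84/Madhav | platform/python-sidecar/rag/chunkers/ucn_section.py | _split_at_h2
-- ===== SOURCE A (Python) =====
-- def _split_at_h2(text: str) -> list[tuple[str, str]]:
--     """Split text at H2 (## ) boundaries. Returns [(heading, body)] pairs."""
--     parts: list[tuple[str, str]] = []
--     current_heading = ""
--     current_body: list[str] = []
--
--     for line in text.split("\n"):
--         if line.startswith("## "):
--             if current_heading or current_body:
--                 parts.append((current_heading, "\n".join(current_body)))
--             current_heading = line[3:].strip()
--             current_body = []
--         else:
--             current_body.append(line)
--
--     if current_heading or current_body: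
--         parts.append((current_heading, "\n".join(current_body)))
--     return parts
-- ===== SOURCE B (Python) =====
-- def _split_at_h2(text: str) -> list[tuple[str, str]]:
--     """Split text at H2 (## ) boundaries, built back-to-front over reversed lines."""
--     sections: list[tuple[str, str]] = []
--     pending: list[str] = []
--     for line in reversed(text.split("\n")):
--         if line.startswith("## "):
--             heading = line[3:].strip()
--             if heading or pending:
--                 sections = [(heading, "\n".join(pending))] + sections
--             pending = []
--         else:
--             pending = [line] + pending
--     if pending:
--         sections = [("", "\n".join(pending))] + sections
--     return sections
-- ===== Notes on version B (the rewrite author's own statement) =====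
-- stated objective: alternative
-- what changed: B iterates the reversed line list and builds the result back-to-front by cons-prepending sections and pending body lines, instead of A's forward loop over mutable (parts, heading, body) state with a duplicated flush step after the loop.
import Mathlib
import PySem

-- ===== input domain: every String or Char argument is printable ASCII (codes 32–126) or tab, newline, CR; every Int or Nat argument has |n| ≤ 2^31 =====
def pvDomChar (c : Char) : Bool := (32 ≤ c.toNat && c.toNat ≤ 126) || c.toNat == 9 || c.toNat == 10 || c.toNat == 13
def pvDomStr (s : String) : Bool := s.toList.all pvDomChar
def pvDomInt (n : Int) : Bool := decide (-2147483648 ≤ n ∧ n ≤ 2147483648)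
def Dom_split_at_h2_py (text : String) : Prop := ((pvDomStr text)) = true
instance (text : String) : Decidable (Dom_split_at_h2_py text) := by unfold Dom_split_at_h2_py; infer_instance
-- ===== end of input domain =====

-- B builds the section list back-to-front over the reversed lines (foldr), instead of A's
-- forward loop over mutable (parts, heading, body) state with a repeated flush after the loop.

-- ===== PORT A =====
-- text.split("\\n"): sep ≠ "", so PySem.Str.split? is always some; .getD [] is exact
-- one loop step of A: state is (parts, current_heading, current_body)
def stepA_split (st : List (String × String) × String × List String) (line : String) :
    List (String × String) × String × List String :=
  if PySem.Str.startswith line "## " = true then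
    let parts := if st.2.1 ≠ "" ∨ st.2.2 ≠ [] then st.1 ++ [(st.2.1, PySem.Str.join "\n" st.2.2)] else st.1
    (parts, PySem.Str.strip (PySem.Str.slice line (some 3) none), ([] : List String))
  else
    (st.1, st.2.1, st.2.2 ++ [line])

def split_at_h2_py (text : String) : List (String × String) :=
  let st := ((PySem.Str.split? text "\n").getD []).foldl stepA_split ([], "", [])
  if st.2.1 ≠ "" ∨ st.2.2 ≠ [] then st.1 ++ [(st.2.1, PySem.Str.join "\n" st.2.2)] else st.1

-- ===== PORT B =====
-- one step of B's reversed-iteration loop: state is (sections, pending body lines)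
def stepB_split (line : String) (st : List (String × String) × List String) :
    List (String × String) × List String :=
  if PySem.Str.startswith line "## " = true then
    let heading := PySem.Str.strip (PySem.Str.slice line (some 3) none)
    ((if heading ≠ "" ∨ st.2 ≠ [] then (heading, PySem.Str.join "\n" st.2) :: st.1 else st.1), ([] : List String))
  else
    (st.1, line :: st.2)

def split_at_h2_py_alt (text : String) : List (String × String) :=
  let st := ((PySem.Str.split? text "\n").getD []).foldr stepB_split ([], [])
  if st.2 ≠ [] then ("", PySem.Str.join "\n" st.2) :: st.1 else st.1

-- ===== PRECONDITION & SPEC =====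
def Spec_split_at_h2_py (text : String) (out : List (String × String)) : Prop := out = split_at_h2_py_alt text
instance (text : String) (out : List (String × String)) : Decidable (Spec_split_at_h2_py text out) := by unfold Spec_split_at_h2_py; infer_instance

-- ===== CLAIM (what is proved, stated in full; the proofs are below) =====
def Claim_equal_split_at_h2_py : Prop := ∀ (text : String), Dom_split_at_h2_py text → Spec_split_at_h2_py text (split_at_h2_py text)

-- ===== LEMMAS AND PROOFS =====

-- a flushed section, as a (possibly empty) list
def emitSec (h : String) (b : List String) : List (String × String) :=
  if h ≠ "" ∨ b ≠ [] then [(h, PySem.Str.join "\n" b)] else []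

-- A's result from state (h, b) onwards, written as forward structural recursion
def runF (h : String) (b : List String) : List String → List (String × String)
  | [] => emitSec h b
  | l :: ls =>
    if PySem.Str.startswith l "## " = true then
      emitSec h b ++ runF (PySem.Str.strip (PySem.Str.slice l (some 3) none)) [] ls
    else
      runF h (b ++ [l]) ls

lemma foldlA_eq_runF (ls : List String) (p : List (String × String)) (h : String) (b : List String) :
    (let st := ls.foldl stepA_split (p, h, b);
     if st.2.1 ≠ "" ∨ st.2.2 ≠ [] then st.1 ++ [(st.2.1, PySem.Str.join "\n" st.2.2)] else st.1)
    = p ++ runF h b ls := by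
  induction ls generalizing p h b with
  | nil =>
    simp only [List.foldl, runF, emitSec]
    split_ifs <;> simp
  | cons l ls ih =>
    simp only [List.foldl, stepA_split, runF]
    by_cases hl : PySem.Str.startswith l "## " = true
    · simp only [hl, if_pos trivial]
      rw [ih]
      simp only [emitSec]
      split_ifs <;> simp
    · simp only [hl]
      exact ih _ _ _

lemma emitSec_append (h : String) (b : List String) (P : List (String × String)) :
    emitSec h b ++ P = if h ≠ "" ∨ b ≠ [] then (h, PySem.Str.join "\n" b) :: P else P := by
  simp only [emitSec]; split_ifs <;> simp

lemma runF_eq_foldrB (ls : List String) (h : String) (b : List String) :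
    runF h b ls
    = emitSec h (b ++ (ls.foldr stepB_split ([], [])).2) ++ (ls.foldr stepB_split ([], [])).1 := by
  induction ls generalizing h b with
  | nil => simp [runF]
  | cons l ls ih =>
    rcases hr : ls.foldr stepB_split ([], []) with ⟨P, pend⟩
    simp only [runF, stepB_split, List.foldr_cons, hr, ih]
    by_cases hl : PySem.Str.startswith l "## " = true
    · simp only [hl, if_true, List.append_nil, List.nil_append, emitSec_append]
    · simp only [hl]
      simp

-- ===== VERDICT (by name: the statement is the Claim_ definition above) =====
theorem split_at_h2_py_spec : Claim_equal_split_at_h2_py := by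
  intro text _
  unfold Spec_split_at_h2_py split_at_h2_py split_at_h2_py_alt
  rcases hr : (((PySem.Str.split? text "\n").getD []).foldr stepB_split ([], [])) with ⟨P, pend⟩
  rw [foldlA_eq_runF, runF_eq_foldrB, hr]
  simp only [List.nil_append, emitSec_append]
  split_ifs <;> simp_all
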